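-- pv_equiv track=rewrite | github.com/U-alb/bioinformatics | Lab 11/L11_2.py | find_kmer_matches
-- ===== SOURCE A (Python) =====
-- from collections import defaultdict
--
-- def find_kmer_matches(seq1, seq2, k=12):
--     kmer_dict = defaultdict(list)
--
--     for i in range(len(seq2) - k + 1):
--         kmer = seq2[i:i + k]
--         kmer_dict[kmer].append(i)
--
--     matches = []
--     for i in range(len(seq1) - k + 1):
--         kmer = seq1[i:i + k]
--         if kmer in kmer_dict:
--             for j in kmer_dict[kmer]:
--                 matches.append((i, j))
--
--     return matches
-- ===== SOURCE B (Python) =====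
-- def find_kmer_matches(seq1, seq2, k=12):
--     # Direct brute-force comparison: no index dict; same pair order (i outer asc, j inner asc)
--     matches = []
--     for i in range(len(seq1) - k + 1):
--         for j in range(len(seq2) - k + 1):
--             if seq1[i:i + k] == seq2[j:j + k]:
--                 matches.append((i, j))
--     return matches
-- ===== Notes on version B (the rewrite author's own statement) =====
-- stated objective: simpler
-- what changed: Replaced the defaultdict k-mer index built over seq2 with a direct double loop comparing slices, appending (i,j) on equality; no dictionary is maintained.
import Mathlib
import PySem

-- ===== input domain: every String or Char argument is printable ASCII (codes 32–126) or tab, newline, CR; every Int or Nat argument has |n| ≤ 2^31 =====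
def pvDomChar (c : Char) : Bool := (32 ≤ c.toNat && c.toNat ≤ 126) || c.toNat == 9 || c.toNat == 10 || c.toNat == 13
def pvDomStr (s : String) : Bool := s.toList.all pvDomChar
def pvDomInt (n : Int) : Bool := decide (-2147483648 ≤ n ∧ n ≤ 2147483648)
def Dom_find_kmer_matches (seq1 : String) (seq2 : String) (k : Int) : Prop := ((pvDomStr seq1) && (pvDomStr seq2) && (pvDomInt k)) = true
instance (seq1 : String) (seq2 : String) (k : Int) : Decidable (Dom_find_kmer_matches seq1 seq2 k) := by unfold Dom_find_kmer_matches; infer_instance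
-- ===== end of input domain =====

-- B replaces A's defaultdict index over seq2 by a plain double loop comparing slices directly (simpler, no dict; same output order).

-- ===== PORT A =====
-- kmer_dict: defaultdict(list); kmer_dict[kmer].append(i) is Dict.modify kmer [] (· ++ [i]).
def find_kmer_matches (seq1 : String) (seq2 : String) (k : Int) : List (Int × Int) :=
  let kmer_dict : PySem.Dict (List Char) (List Int) :=
    (PySem.List.pyRange 0 ((seq2.toList.length : Int) - k + 1) 1).foldl
      (fun d i => d.modify (PySem.List.slice seq2.toList (some i) (some (i + k))) [] (fun l => l ++ [i]))
      PySem.Dict.empty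
  (PySem.List.pyRange 0 ((seq1.toList.length : Int) - k + 1) 1).foldl
    (fun ms i =>
      let kmer := PySem.List.slice seq1.toList (some i) (some (i + k))
      if kmer_dict.contains kmer then
        (kmer_dict.getD kmer []).foldl (fun ms j => ms ++ [(i, j)]) ms
      else ms) []

-- ===== PORT B =====
def find_kmer_matches_alt (seq1 : String) (seq2 : String) (k : Int) : List (Int × Int) :=
  (PySem.List.pyRange 0 ((seq1.toList.length : Int) - k + 1) 1).foldl
    (fun ms i =>
      (PySem.List.pyRange 0 ((seq2.toList.length : Int) - k + 1) 1).foldl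
        (fun ms j =>
          if PySem.List.slice seq1.toList (some i) (some (i + k))
              == PySem.List.slice seq2.toList (some j) (some (j + k))
          then ms ++ [(i, j)] else ms)
        ms) []

-- ===== PRECONDITION & SPEC =====
def Spec_find_kmer_matches (seq1 : String) (seq2 : String) (k : Int) (out : List (Int × Int)) : Prop := out = find_kmer_matches_alt seq1 seq2 k
instance (seq1 : String) (seq2 : String) (k : Int) (out : List (Int × Int)) : Decidable (Spec_find_kmer_matches seq1 seq2 k out) := by unfold Spec_find_kmer_matches; infer_instance

-- ===== CLAIM (what is proved, stated in full; the proofs are below) =====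
def Claim_equal_find_kmer_matches : Prop := ∀ (seq1 : String) (seq2 : String) (k : Int), Dom_find_kmer_matches seq1 seq2 k → Spec_find_kmer_matches seq1 seq2 k (find_kmer_matches seq1 seq2 k)

-- ===== LEMMAS AND PROOFS =====

-- The dict built by A's first loop, looked up at key c, yields exactly the j's of the
-- range whose seq2-slice equals c (in ascending order).
theorem pv_getD_build {km : Int → List Char}
    (r : List Int) (c : List Char) :
    (r.foldl (fun d i => d.modify (km i) [] (fun l => l ++ [i]))
        (PySem.Dict.empty : PySem.Dict (List Char) (List Int))).getD c []
      = r.filter (fun j => km j == c) := by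
  have h := PySem.Dict.getD_foldl_modify_append
    (l := r.map (fun i => (km i, i))) (d := (PySem.Dict.empty : PySem.Dict (List Char) (List Int))) (c := c)
  rw [List.foldl_map] at h
  simpa [List.filter_map, Function.comp_def, List.map_map] using h

-- If a key is absent from the built dict, no j of the range matches it.
theorem pv_contains_build {km : Int → List Char}
    (r : List Int) (c : List Char)
    (h : (r.foldl (fun d i => d.modify (km i) [] (fun l => l ++ [i]))
        (PySem.Dict.empty : PySem.Dict (List Char) (List Int))).contains c = false) :
    r.filter (fun j => km j == c) = [] := by
  have hk := PySem.Dict.keys_foldl_modify_key (l := r) (key := km) (d0 := ([] : List Int))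
    (f := fun (d : PySem.Dict (List Char) (List Int)) i (l : List Int) => l ++ [i])
    (d := (PySem.Dict.empty : PySem.Dict (List Char) (List Int)))
  rw [List.filter_eq_nil_iff]
  intro j hj hbeq
  have hc : c ∈ (r.foldl (fun d i => d.modify (km i) [] (fun l => l ++ [i]))
      (PySem.Dict.empty : PySem.Dict (List Char) (List Int))).keys := by
    rw [hk]
    have : c ∈ r.map km := List.mem_map.mpr ⟨j, hj, by simpa using hbeq⟩
    simp [PySem.Dict.keys_empty, PySem.Set.mem_update, this]
  exact absurd ((PySem.Dict.contains_iff_mem_keys _ _).mpr hc) (by simp [h])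

-- A's per-i body (dict lookup then append loop) equals B's per-i inner loop.
theorem pv_body (km : Int → List Char) (r2 : List Int) (c : List Char) (i : Int)
    (acc : List (Int × Int)) :
    (if (r2.foldl (fun d j => d.modify (km j) [] (fun l => l ++ [j]))
          (PySem.Dict.empty : PySem.Dict (List Char) (List Int))).contains c then
        ((r2.foldl (fun d j => d.modify (km j) [] (fun l => l ++ [j]))
          (PySem.Dict.empty : PySem.Dict (List Char) (List Int))).getD c []).foldl
          (fun ms j => ms ++ [(i, j)]) acc
      else acc)
      = r2.foldl (fun ms j => if c == km j then ms ++ [(i, j)] else ms) acc := by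
  rw [PySem.List.foldl_append_if (p := fun j => c == km j) (f := fun j => (i, j))]
  have hfilter : r2.filter (fun j => c == km j) = r2.filter (fun j => km j == c) :=
    List.filter_congr (fun j _ => by simp [BEq.comm])
  by_cases h : (r2.foldl (fun d j => d.modify (km j) [] (fun l => l ++ [j]))
      (PySem.Dict.empty : PySem.Dict (List Char) (List Int))).contains c = true
  · rw [if_pos h, PySem.List.foldl_append_singleton_eq_map, pv_getD_build, hfilter]
  · rw [Bool.not_eq_true] at h
    rw [if_neg (by simp [h]), hfilter, pv_contains_build r2 c h]
    simp

-- ===== VERDICT (by name: the statement is the Claim_ definition above) =====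
theorem find_kmer_matches_spec : Claim_equal_find_kmer_matches := by
  intro seq1 seq2 k _
  unfold Spec_find_kmer_matches find_kmer_matches find_kmer_matches_alt
  apply PySem.List.foldl_congr_mem
  intro acc i _
  exact pv_body (fun j => PySem.List.slice seq2.toList (some j) (some (j + k)))
    (PySem.List.pyRange 0 ((seq2.toList.length : Int) - k + 1) 1)
    (PySem.List.slice seq1.toList (some i) (some (i + k))) i acc
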